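-- pv_equiv track=rewrite | github.com/KarinaJadia/collection | crypt_algos.py | encrypt_binary
-- ===== SOURCE A (Python) =====
-- def encrypt_binary(binary_str, key):
--     # XOR with k1
--     # Left shift by k2 bits (modulo 8)
--     # XOR with k3
--     # Right shift by k4 bits (modulo 8)
--     # k1, k2, k3, k4 = key
--     k1, k2, k3, k4 = key
--     encrypted = ""
--     for i in range(0, len(binary_str), 8):
--         byte = binary_str[i:i+8]
--         if len(byte) < 8:
--             byte = byte.ljust(8, '0')
--         b = int(byte, 2)
--
--         b ^= k1
--         b = ((b << k2) | (b >> (8 - k2))) & 0xFF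
--         b ^= k3
--         b = ((b >> k4) | (b << (8 - k4))) & 0xFF
--
--         encrypted += f"{b:08b}"
--     return encrypted
-- ===== SOURCE B (Python) =====
-- def encrypt_binary(binary_str, key):
--     k1, k2, k3, k4 = key
--     # translation table: each possible plaintext byte (as its 8-char binary
--     # string) -> encrypted 8-char binary string
--     table = {}
--     for v in range(256):
--         b = v ^ k1
--         b = ((b << k2) | (b >> (8 - k2))) & 0xFF
--         b ^= k3
--         b = ((b >> k4) | (b << (8 - k4))) & 0xFF
--         table[f"{v:08b}"] = f"{b:08b}"
--     padded = binary_str + '0' * (-len(binary_str) % 8)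
--     return ''.join(table[padded[i:i+8]] for i in range(0, len(padded), 8))
-- ===== Notes on version B (the rewrite author's own statement) =====
-- stated objective: faster
-- what changed: B precomputes a 256-entry dict mapping each 8-char binary byte string directly to its encrypted 8-char string, pads the input once up front, and joins table lookups over the chunks, so the per-chunk int() parse, bit arithmetic and formatting disappear from the scan; …
-- outside the precondition, e.g. on encrypt_binary('', (0, 9, 0, 0)): A returns '', B raises ValueError; on encrypt_binary('1_000', (1, 1, 1, 1)): A returns '11000001', B raises KeyError; on encrypt_binary(' 1', (0, 0, 0, 0)): A returns '01000000', B raises KeyError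
import Mathlib
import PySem

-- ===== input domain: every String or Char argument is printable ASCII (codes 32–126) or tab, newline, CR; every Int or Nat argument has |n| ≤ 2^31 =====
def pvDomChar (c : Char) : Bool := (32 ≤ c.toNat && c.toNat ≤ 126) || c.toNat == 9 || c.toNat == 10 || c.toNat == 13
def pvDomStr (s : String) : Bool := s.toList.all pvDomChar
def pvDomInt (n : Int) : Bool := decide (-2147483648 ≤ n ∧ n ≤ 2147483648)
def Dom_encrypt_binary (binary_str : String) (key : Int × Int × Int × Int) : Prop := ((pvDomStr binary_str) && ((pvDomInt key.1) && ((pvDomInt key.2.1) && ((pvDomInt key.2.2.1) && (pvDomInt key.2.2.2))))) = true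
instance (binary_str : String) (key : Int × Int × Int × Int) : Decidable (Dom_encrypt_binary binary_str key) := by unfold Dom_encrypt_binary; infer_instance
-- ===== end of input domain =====

-- B replaces A's per-chunk int()-parse/bit-arithmetic/format pipeline by one precomputed
-- 256-entry dict from plaintext byte strings to encrypted byte strings, padding once up front
-- and joining table lookups (a constant-factor mechanism: the per-chunk work becomes one
-- dict lookup; the harness could not time it on its non-binary large inputs).

-- shared hand-ported primitives of both Pythons:
-- f"{b:08b}" — hand port, exact for 0 ≤ b < 256 (both programs only format values
-- that are & 0xFF-masked or drawn from range(256))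
def pvFmt8 (b : Int) : List Char :=
  (List.range 8).map (fun j => if PySem.Int.band (b >>> (7 - j)) 1 = 1 then '1' else '0')

-- int(s, 2) — hand port, exact for nonempty strings of '0'/'1' digits (all that reaches
-- it under Pre_; elsewhere Python raises ValueError)
def pvParse2 (cs : List Char) : Int :=
  cs.foldl (fun a c => 2 * a + (if c = '1' then 1 else 0)) 0

-- the 4-step XOR/rotate byte pipeline both Pythons apply (A inline per chunk,
-- B inline in its table-building loop); b << k / b >> k are Lean's <<< / >>> with a Nat
-- count; .toNat is exact under Pre_ (0 ≤ k2 ≤ 8, 0 ≤ k4 ≤ 8; outside it Python raises)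
def pvMix (k1 k2 k3 k4 b0 : Int) : Int :=
  let b := PySem.Int.bxor b0 k1
  let b := PySem.Int.band (PySem.Int.bor (b <<< k2.toNat) (b >>> (8 - k2).toNat)) 255
  let b := PySem.Int.bxor b k3
  PySem.Int.band (PySem.Int.bor (b >>> k4.toNat) (b <<< (8 - k4).toNat)) 255

-- ===== PORT A =====
def encrypt_binary (binary_str : String) (key : Int × Int × Int × Int) : String :=
  let k1 := key.1
  let k2 := key.2.1
  let k3 := key.2.2.1
  let k4 := key.2.2.2
  let cs := binary_str.toList
  let encrypted := (PySem.List.pyRange 0 (cs.length : Int) 8).foldl (fun acc i =>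
    let byte := PySem.List.slice cs (some i) (some (i + 8))
    let byte := if byte.length < 8 then byte ++ List.replicate (8 - byte.length) '0' else byte
    let b := pvParse2 byte
    let b := pvMix k1 k2 k3 k4 b
    acc ++ pvFmt8 b) []
  String.ofList encrypted

-- ===== PORT B =====
def pvTable (k1 k2 k3 k4 : Int) : PySem.Dict (List Char) (List Char) :=
  (List.range 256).foldl (fun table (v : Nat) =>
    PySem.Dict.insert table (pvFmt8 (v : Int)) (pvFmt8 (pvMix k1 k2 k3 k4 (v : Int))))
    PySem.Dict.empty

def encrypt_binary_alt (binary_str : String) (key : Int × Int × Int × Int) : String :=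
  let table := pvTable key.1 key.2.1 key.2.2.1 key.2.2.2
  let padded := binary_str.toList ++
      List.replicate (PySem.Int.mod (-(binary_str.toList.length : Int)) 8).toNat '0'
  -- table[...] raises KeyError only outside Pre_; .getD [] is exact under Pre_
  String.ofList (((PySem.List.pyRange 0 (padded.length : Int) 8).map (fun i =>
      (PySem.Dict.get? table (PySem.List.slice padded (some i) (some (i + 8)))).getD [])).flatten)

-- ===== PRECONDITION & SPEC =====
-- Pre_ admits only '0'/'1' strings with k2/k4 in [0, 8]. Outside it A raises (ValueError
-- from int(byte, 2) or from a negative shift count), except two corners where A still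
-- returns and B naturally raises: the empty string with an out-of-range shift count (A
-- returns '' without ever touching the key; B's upfront table construction raises), and
-- strings with underscores/whitespace/signs that int(chunk, 2) happens to tolerate (B's
-- dict lookup raises KeyError).
def Pre_encrypt_binary (binary_str : String) (key : Int × Int × Int × Int) : Prop :=
  (binary_str.toList.all fun c => c == '0' || c == '1') = true ∧
  0 ≤ key.2.1 ∧ key.2.1 ≤ 8 ∧ 0 ≤ key.2.2.2 ∧ key.2.2.2 ≤ 8
instance (binary_str : String) (key : Int × Int × Int × Int) : Decidable (Pre_encrypt_binary binary_str key) := by unfold Pre_encrypt_binary; infer_instance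

def pvWitness_encrypt_binary : String × (Int × Int × Int × Int) := ("1010010111", (1234567, 3, -99, 7))

def Spec_encrypt_binary (binary_str : String) (key : Int × Int × Int × Int) (out : String) : Prop := out = encrypt_binary_alt binary_str key
instance (binary_str : String) (key : Int × Int × Int × Int) (out : String) : Decidable (Spec_encrypt_binary binary_str key out) := by unfold Spec_encrypt_binary; infer_instance

-- ===== CLAIM (what is proved, stated in full; the proofs are below) =====
def Claim_equal_encrypt_binary : Prop := ∀ (binary_str : String) (key : Int × Int × Int × Int), Dom_encrypt_binary binary_str key → Pre_encrypt_binary binary_str key → Spec_encrypt_binary binary_str key (encrypt_binary binary_str key)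

-- ===== LEMMAS AND PROOFS =====

def pvLjust8 (cs : List Char) : List Char :=
  if cs.length < 8 then cs ++ List.replicate (8 - cs.length) '0' else cs

lemma encA_eq (s : String) (key : Int × Int × Int × Int) :
    encrypt_binary s key = String.ofList ((PySem.List.pyRange 0 (s.toList.length : Int) 8).foldl
      (fun acc i => acc ++ pvFmt8 (pvMix key.1 key.2.1 key.2.2.1 key.2.2.2
        (pvParse2 (pvLjust8 (PySem.List.slice s.toList (some i) (some (i + 8))))))) []) := rfl

lemma encB_eq (s : String) (key : Int × Int × Int × Int) :
    encrypt_binary_alt s key = String.ofList (((PySem.List.pyRange 0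
        (((s.toList ++ List.replicate (PySem.Int.mod (-(s.toList.length : Int)) 8).toNat '0').length : Int)) 8).map
      (fun i => (PySem.Dict.get? (pvTable key.1 key.2.1 key.2.2.1 key.2.2.2)
        (PySem.List.slice (s.toList ++ List.replicate (PySem.Int.mod (-(s.toList.length : Int)) 8).toNat '0')
          (some i) (some (i + 8)))).getD [])).flatten) := rfl

set_option maxRecDepth 100000 in
lemma pvTable_eq (k1 k2 k3 k4 : Int) :
    pvTable k1 k2 k3 k4 = (List.range 256).foldl
      (fun table (v : Nat) => PySem.Dict.insert table (pvFmt8 (v : Int)) (pvFmt8 (pvMix k1 k2 k3 k4 (v : Int))))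
      PySem.Dict.empty := rfl

lemma pyRange8 (n : Nat) :
    PySem.List.pyRange 0 (n : Int) 8 = (List.range ((n + 7) / 8)).map (fun k => ((8 * k : Nat) : Int)) := by
  rw [PySem.List.pyRange_of_pos 0 (n : Int) (by norm_num)]
  have hcount : (if (0:Int) < (n:Int) then (((n:Int) - 0 + 8 - 1) / 8).toNat else 0) = (n + 7) / 8 := by
    split <;> omega
  rw [hcount]
  simp

lemma parse_aux : ∀ (cs : List Char) (a : Int), 0 ≤ a →
    0 ≤ cs.foldl (fun a c => 2 * a + (if c = '1' then 1 else 0)) a ∧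
    cs.foldl (fun a c => 2 * a + (if c = '1' then 1 else 0)) a < (a + 1) * 2 ^ cs.length := by
  intro cs
  induction cs with
  | nil =>
    intro a ha
    simp only [List.foldl_nil, List.length_nil, pow_zero, mul_one]
    exact ⟨ha, by omega⟩
  | cons c cs ih =>
    intro a ha
    simp only [List.foldl_cons, List.length_cons]
    have hbit0 : (0:Int) ≤ if c = '1' then 1 else 0 := by split <;> omega
    have hbit1 : (if c = '1' then (1:Int) else 0) ≤ 1 := by split <;> omega
    obtain ⟨ih0, ih1⟩ := ih (2 * a + (if c = '1' then 1 else 0)) (by omega)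
    refine ⟨ih0, lt_of_lt_of_le ih1 ?_⟩
    have h2 : (0:Int) ≤ 2 ^ cs.length := by positivity
    have hstep : 2 * a + (if c = '1' then 1 else 0) + 1 ≤ 2 * (a + 1) := by omega
    calc (2 * a + (if c = '1' then 1 else 0) + 1) * 2 ^ cs.length
        ≤ (2 * (a + 1)) * 2 ^ cs.length := mul_le_mul_of_nonneg_right hstep h2
      _ = (a + 1) * 2 ^ (cs.length + 1) := by rw [pow_succ]; ring

lemma parse_bounds (cs : List Char) : 0 ≤ pvParse2 cs ∧ pvParse2 cs < 2 ^ cs.length := by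
  have h := parse_aux cs 0 le_rfl
  simpa [pvParse2] using h

set_option maxRecDepth 100000 in
set_option maxHeartbeats 1000000 in
lemma parse_fmt8 : ∀ m : Fin 256, pvParse2 (pvFmt8 ((m : Nat) : Int)) = ((m : Nat) : Int) := by decide

lemma fmt8_inj {m m' : Nat} (hm : m < 256) (hm' : m' < 256)
    (h : pvFmt8 (m : Int) = pvFmt8 (m' : Int)) : m = m' := by
  have h1 := parse_fmt8 ⟨m, hm⟩
  have h2 := parse_fmt8 ⟨m', hm'⟩
  rw [h] at h1
  rw [h2] at h1
  exact_mod_cast h1.symm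

set_option maxRecDepth 100000 in
set_option maxHeartbeats 2000000 in
lemma roundtrip8 (c0 c1 c2 c3 c4 c5 c6 c7 : Char)
    (h0 : c0 = '0' ∨ c0 = '1') (h1 : c1 = '0' ∨ c1 = '1') (h2 : c2 = '0' ∨ c2 = '1')
    (h3 : c3 = '0' ∨ c3 = '1') (h4 : c4 = '0' ∨ c4 = '1') (h5 : c5 = '0' ∨ c5 = '1')
    (h6 : c6 = '0' ∨ c6 = '1') (h7 : c7 = '0' ∨ c7 = '1') :
    pvFmt8 (pvParse2 [c0, c1, c2, c3, c4, c5, c6, c7]) = [c0, c1, c2, c3, c4, c5, c6, c7] := by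
  rcases h0 with rfl | rfl <;> rcases h1 with rfl | rfl <;> rcases h2 with rfl | rfl <;>
    rcases h3 with rfl | rfl <;> rcases h4 with rfl | rfl <;> rcases h5 with rfl | rfl <;>
    rcases h6 with rfl | rfl <;> rcases h7 with rfl | rfl <;> decide

lemma fmt_parse_of (cs : List Char) (hlen : cs.length = 8)
    (hbin : ∀ c ∈ cs, c = '0' ∨ c = '1') : pvFmt8 (pvParse2 cs) = cs := by
  rcases cs with _ | ⟨c0, cs⟩; · simp at hlen
  rcases cs with _ | ⟨c1, cs⟩; · simp at hlen
  rcases cs with _ | ⟨c2, cs⟩; · simp at hlen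
  rcases cs with _ | ⟨c3, cs⟩; · simp at hlen
  rcases cs with _ | ⟨c4, cs⟩; · simp at hlen
  rcases cs with _ | ⟨c5, cs⟩; · simp at hlen
  rcases cs with _ | ⟨c6, cs⟩; · simp at hlen
  rcases cs with _ | ⟨c7, cs⟩; · simp at hlen
  rcases cs with _ | ⟨c8, cs⟩
  · exact roundtrip8 c0 c1 c2 c3 c4 c5 c6 c7 (hbin c0 (by simp)) (hbin c1 (by simp))
      (hbin c2 (by simp)) (hbin c3 (by simp)) (hbin c4 (by simp)) (hbin c5 (by simp))
      (hbin c6 (by simp)) (hbin c7 (by simp))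
  · simp at hlen

lemma table_get (k1 k2 k3 k4 : Int) :
    ∀ (n : Nat), n ≤ 256 → ∀ (m : Nat), m < n →
    PySem.Dict.get? ((List.range n).foldl
      (fun table (v : Nat) => PySem.Dict.insert table (pvFmt8 (v : Int)) (pvFmt8 (pvMix k1 k2 k3 k4 (v : Int))))
      PySem.Dict.empty) (pvFmt8 (m : Int))
      = some (pvFmt8 (pvMix k1 k2 k3 k4 (m : Int))) := by
  intro n
  induction n with
  | zero => intro _ m hm; omega
  | succ n ih =>
    intro hn m hm
    rw [List.range_succ, List.foldl_append, List.foldl_cons, List.foldl_nil]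
    by_cases hmn : m = n
    · subst hmn
      exact PySem.Dict.get?_insert_self _ _ _
    · rw [PySem.Dict.get?_insert_of_ne _ _ (fun h => hmn (fmt8_inj (by omega) (by omega) h))]
      exact ih (by omega) m (by omega)

-- the padded chunk at offset 8k equals A's ljust-ed chunk
lemma chunk_eq (cs : List Char) (z k : Nat)
    (hz : (z : Int) = (-(cs.length : Int)) % 8)
    (hk : 8 * k < cs.length) :
    List.take 8 (List.drop (8 * k) (cs ++ List.replicate z '0'))
      = pvLjust8 (List.take 8 (List.drop (8 * k) cs)) := by
  have h0 : 8 * k - cs.length = 0 := by omega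
  rw [List.drop_append, List.drop_replicate, h0, Nat.sub_zero, List.take_append,
    List.take_replicate]
  have hlen : (List.drop (8 * k) cs).length = cs.length - 8 * k := by simp
  by_cases hm : cs.length - 8 * k < 8
  · have htake : List.take 8 (List.drop (8 * k) cs) = List.drop (8 * k) cs :=
      List.take_of_length_le (by omega)
    have hmin : min (8 - (List.drop (8 * k) cs).length) z = 8 - (List.drop (8 * k) cs).length := by
      omega
    rw [htake, hmin, pvLjust8, if_pos (by omega)]
  · have hlen8 : (List.take 8 (List.drop (8 * k) cs)).length = 8 := by
      simp
      omega
    have hmin0 : min (8 - (List.drop (8 * k) cs).length) z = 0 := by omega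
    rw [pvLjust8, if_neg (by omega), hmin0]
    simp

lemma flatMap_eq_map_flatten {α β : Type} (g : α → List β) (l : List α) :
    l.flatMap g = (l.map g).flatten := by
  simp [List.flatMap_def]

-- ===== VERDICT (by name: the statement is the Claim_ definition above) =====
set_option maxRecDepth 100000 in
set_option maxHeartbeats 1000000 in
theorem encrypt_binary_spec : Claim_equal_encrypt_binary := by
  intro s key _ hPre
  obtain ⟨hbin, hk2, hk2', hk4, hk4'⟩ := hPre
  unfold Spec_encrypt_binary
  rw [encA_eq, encB_eq, PySem.List.foldl_append_eq_flatMap, List.nil_append,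
    flatMap_eq_map_flatten]
  refine congrArg String.ofList ?_
  set cs := s.toList with hcs
  set n := cs.length with hn
  set z := (PySem.Int.mod (-(n : Int)) 8).toNat with hzdef
  have hzmod : (z : Int) = (-(n : Int)) % 8 := by
    rw [hzdef, PySem.Int.mod_eq_emod_of_pos (by norm_num)]
    omega
  have hlenp : (cs ++ List.replicate z '0').length = n + z := by
    simp
    omega
  rw [hlenp, pyRange8 n, pyRange8 (n + z)]
  have hq : (n + z + 7) / 8 = (n + 7) / 8 := by omega
  rw [hq, List.map_map, List.map_map]
  refine congrArg List.flatten ?_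
  apply List.map_congr_left
  intro k hk
  simp only [List.mem_range] at hk
  simp only [Function.comp]
  -- chunk indices
  have hkn : 8 * k < n := by omega
  have hcast : ((8 * k : Nat) : Int) + 8 = ((8 * k + 8 : Nat) : Int) := by push_cast; ring
  rw [hcast, PySem.List.slice_natCast, PySem.List.slice_natCast]
  have h8 : 8 * k + 8 - 8 * k = 8 := by omega
  rw [h8]
  -- the two chunks coincide
  rw [chunk_eq cs z k hzmod hkn]
  set C := pvLjust8 ((cs.drop (8 * k)).take 8) with hC
  have hCbin : ∀ c ∈ C, c = '0' ∨ c = '1' := by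
    intro c hc
    rw [hC, pvLjust8] at hc
    have hmem : c ∈ (cs.drop (8 * k)).take 8 ∨ c = '0' := by
      split at hc
      · rcases List.mem_append.mp hc with h | h
        · exact Or.inl h
        · exact Or.inr (List.eq_of_mem_replicate h)
      · exact Or.inl hc
    rcases hmem with h | h
    · have : c ∈ cs := List.mem_of_mem_drop (List.mem_of_mem_take h)
      have := List.all_eq_true.mp hbin c this
      simpa using this
    · exact Or.inl h
  have hClen : C.length = 8 := by
    rw [hC, pvLjust8]
    split
    · simp only [List.length_append, List.length_replicate]
      omega
    · rename_i hh
      simp only [List.length_take, List.length_drop] at hh ⊢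
      omega
  -- parse the chunk; its value indexes the table
  have hb := parse_bounds C
  rw [hClen] at hb
  have hp : pvParse2 C = ((pvParse2 C).toNat : Int) := by omega
  have hm : (pvParse2 C).toNat < 256 := by omega
  have hfmt : pvFmt8 (pvParse2 C) = C := fmt_parse_of C hClen hCbin
  conv_rhs => rw [pvTable_eq, ← hfmt, hp]
  rw [table_get key.1 key.2.1 key.2.2.1 key.2.2.2 256 le_rfl (pvParse2 C).toNat hm,
    Option.getD_some, ← hp]
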